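-- pv_equiv track=rewrite | github.com/chinjieh/mugenplcfg | src/util.py | numberMultiples
-- ===== SOURCE A (Python) =====
-- def numberMultiples(listin):
--     "Numbers repeated elements in list, leaves it alone if element is solo"
--     NUMBER_FORMAT = "_%d"
--     repeatednames = []
--     namecount = {}  # name, count
--     for name in listin:
--         if name not in repeatednames:
--             if listin.count(name) > 1:
--                 repeatednames.append(name)
--
--     listout = []
--     for name in listin:
--         if name in repeatednames:
--             if name not in namecount:
--                 namecount[name] = 1
--             else:
--                 namecount[name] += 1
--             newname = name + NUMBER_FORMAT % namecount[name]
--             listout.append(newname)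
--         else:
--             listout.append(name)
--
--     return listout
-- ===== SOURCE B (Python) =====
-- def numberMultiples(listin):
--     "Numbers repeated elements in list, leaves it alone if element is solo"
--     positions = {}
--     for i, name in enumerate(listin):
--         positions.setdefault(name, []).append(i)
--     out = [None] * len(listin)
--     for name, idxs in positions.items():
--         if len(idxs) == 1:
--             out[idxs[0]] = name
--         else:
--             for k, i in enumerate(idxs):
--                 out[i] = name + "_%d" % (k + 1)
--     return out
-- ===== Notes on version B (the rewrite author's own statement) =====
-- stated objective: faster
-- what changed: Instead of A's duplicate-list scan plus a second sequential pass with a running counter, B builds a name-to-positions index in one enumerate pass and then fills a preallocated result by position, numbering each group's occurrences from its index list.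
import Mathlib
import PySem

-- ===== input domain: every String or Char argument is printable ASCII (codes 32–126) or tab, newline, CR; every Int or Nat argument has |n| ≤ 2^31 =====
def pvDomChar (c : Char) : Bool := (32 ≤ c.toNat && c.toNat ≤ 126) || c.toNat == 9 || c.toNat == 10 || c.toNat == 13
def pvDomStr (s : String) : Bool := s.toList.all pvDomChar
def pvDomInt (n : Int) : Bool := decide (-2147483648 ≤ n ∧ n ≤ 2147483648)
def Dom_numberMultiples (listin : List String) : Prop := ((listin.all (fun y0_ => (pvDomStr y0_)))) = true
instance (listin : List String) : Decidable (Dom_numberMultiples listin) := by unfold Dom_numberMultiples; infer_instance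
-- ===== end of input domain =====

-- B replaces A's quadratic repeated-name scan plus sequential counting pass with a
-- name→positions index built in one enumerate pass, then fills a preallocated
-- result by position, numbering each group from its index list (objective: faster).

-- ===== PORT A =====
-- A's first loop: collect names (in order) that occur more than once
def repNames (listin : List String) : List String :=
  listin.foldl (fun rn name =>
    if !(rn.contains name) then
      if PySem.List.count listin name > 1 then rn ++ [name] else rn
    else rn) []

-- the body of A's second loop, carrying (listout, namecount)
def stepA (repeatednames : List String) (acc : List String × PySem.Dict String Int)
    (name : String) : List String × PySem.Dict String Int :=
  if repeatednames.contains name then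
    let namecount :=
      if !(acc.2.contains name) then acc.2.insert name 1
      else PySem.Dict.modify acc.2 name 0 (· + 1)
    (acc.1 ++ [name ++ "_" ++ PySem.Int.toStr (namecount.getD name 0)], namecount)
  else (acc.1 ++ [name], acc.2)

def numberMultiples (listin : List String) : List String :=
  let repeatednames := repNames listin
  (listin.foldl (stepA repeatednames) ([], PySem.Dict.empty)).1

-- ===== PORT B =====
def numberMultiples_alt (listin : List String) : List String :=
  -- positions.setdefault(name, []).append(i) over enumerate(listin)
  let positions := (PySem.List.enumerate listin).foldl
    (fun d p => PySem.Dict.modify d p.2 [] (fun l => l ++ [p.1])) PySem.Dict.empty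
  -- out = [None] * len(listin); "" is the placeholder (every cell is overwritten)
  let out0 := List.replicate listin.length ""
  positions.items.foldl (fun out p =>
    if p.2.length == 1 then
      PySem.List.pySetD out (PySem.List.pyGetD p.2 0 0) p.1
    else
      (PySem.List.enumerate p.2).foldl
        (fun out q => PySem.List.pySetD out q.2 (p.1 ++ "_" ++ PySem.Int.toStr (q.1 + 1))) out)
    out0

-- ===== PRECONDITION & SPEC =====
def Spec_numberMultiples (listin : List String) (out : List String) : Prop := out = numberMultiples_alt listin
instance (listin : List String) (out : List String) : Decidable (Spec_numberMultiples listin out) := by unfold Spec_numberMultiples; infer_instance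

-- ===== CLAIM (what is proved, stated in full; the proofs are below) =====
def Claim_equal_numberMultiples : Prop := ∀ (listin : List String), Dom_numberMultiples listin → Spec_numberMultiples listin (numberMultiples listin)

-- ===== LEMMAS AND PROOFS =====

-- The common specification: element j of the output, computed positionally.
def nthOut (L : List String) (j : Nat) : String :=
  let name := L.getD j ""
  if 1 < L.count name then
    name ++ "_" ++ PySem.Int.toStr (((L.take (j + 1)).count name : Nat) : Int)
  else name

def specOut (L : List String) : List String := (List.range L.length).map (nthOut L)

def posIdx (L : List String) (name : String) : List Int :=
  ((PySem.List.enumerate L).filter (fun p => p.2 == name)).map (·.1)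

lemma length_posIdx (L : List String) (name : String) :
    (posIdx L name).length = L.count name := by
  simp only [posIdx, List.length_map]
  conv_rhs => rw [← PySem.List.map_snd_enumerate L 0]
  rw [List.count_eq_countP, List.countP_map, List.countP_eq_length_filter]
  rfl

lemma mem_posIdx (L : List String) (name : String) (j : Nat) :
    (j : Int) ∈ posIdx L name ↔ ∃ h : j < L.length, L[j] = name := by
  simp only [posIdx, List.mem_map, List.mem_filter, PySem.List.mem_enumerate_iff]
  constructor
  · rintro ⟨p, ⟨⟨k, hk, rfl⟩, hpn⟩, h1⟩
    simp at hpn h1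
    exact ⟨h1 ▸ hk, by subst h1; simpa using hpn⟩
  · rintro ⟨hj, hn⟩
    exact ⟨((j:Int), name), ⟨⟨j, hj, by simp [hn]⟩, by simp⟩, rfl⟩

lemma posIdx_append_singleton (L : List String) (x name : String) :
    posIdx (L ++ [x]) name
      = posIdx L name ++ (if x == name then [(L.length : Int)] else []) := by
  simp only [posIdx, PySem.List.enumerate_append]
  rw [List.filter_append, List.map_append]
  congr 1
  by_cases h : x == name <;> simp [PySem.List.enumerate, h]

lemma count_append_singleton (L : List String) (x name : String) :
    (L ++ [x]).count name = L.count name + (if x == name then 1 else 0) := by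
  rw [List.count_append]
  by_cases h : x == name
  · have hx : x = name := by simpa using h
    simp [hx]
  · have hx : ¬ x = name := by simpa using h
    simp [h, hx]

lemma posIdx_elem (L : List String) (name : String) :
    ∀ k, k < (posIdx L name).length → ∃ j : Nat, j < L.length ∧
      (posIdx L name)[k]? = some (j : Int) ∧ L[j]? = some name ∧
      (L.take (j + 1)).count name = k + 1 := by
  induction L using List.reverseRecOn with
  | nil => simp [posIdx, PySem.List.enumerate]
  | append_singleton L x ih =>
      intro k hk
      rw [posIdx_append_singleton] at hk ⊢
      by_cases hkl : k < (posIdx L name).length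
      · obtain ⟨j, hj, h1, h2, h3⟩ := ih k hkl
        refine ⟨j, by simp; omega, ?_, ?_, ?_⟩
        · rw [List.getElem?_append_left hkl]; exact h1
        · rw [List.getElem?_append_left hj]; exact h2
        · rw [List.take_append_of_le_length (by omega)]; exact h3
      · by_cases hx : x == name
        · have hxe : x = name := by simpa using hx
          simp only [hx, if_true, List.length_append, List.length_singleton] at hk
          have hkeq : k = (posIdx L name).length := by omega
          refine ⟨L.length, by simp, ?_, ?_, ?_⟩
          · rw [hx, if_pos rfl] at *
            rw [hkeq, List.getElem?_append_right (le_refl _)]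
            simp
          · simp [hxe]
          · rw [List.take_of_length_le (by simp)]
            rw [count_append_singleton, hkeq, length_posIdx, hx]
            simp
        · simp [hx] at hk
          omega

lemma getD_groupFold (L : List String) (name : String) :
    ((PySem.List.enumerate L).foldl
        (fun d p => PySem.Dict.modify d p.2 [] (fun l => l ++ [p.1]))
        PySem.Dict.empty).getD name [] = posIdx L name := by
  have h : (((PySem.List.enumerate L).map (fun p => (p.2, p.1))).foldl
        (fun d p => PySem.Dict.modify d p.1 [] (fun l => l ++ [p.2])) PySem.Dict.empty)
      = (PySem.List.enumerate L).foldl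
        (fun d p => PySem.Dict.modify d p.2 [] (fun l => l ++ [p.1])) PySem.Dict.empty := by
    rw [List.foldl_map]
  rw [← h]
  rw [PySem.Dict.getD_foldl_modify_append]
  simp [posIdx, List.filter_map, List.map_map, Function.comp_def]

lemma keys_groupFold (L : List String) :
    ((PySem.List.enumerate L).foldl
        (fun d p => PySem.Dict.modify d p.2 [] (fun l => l ++ [p.1]))
        PySem.Dict.empty).keys = PySem.Set.ofList L := by
  rw [PySem.Dict.keys_foldl_modify_key]
  rw [PySem.List.map_snd_enumerate]
  simp [PySem.Set.update_nil_left]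

lemma items_groupFold (L : List String) :
    ((PySem.List.enumerate L).foldl
        (fun d p => PySem.Dict.modify d p.2 [] (fun l => l ++ [p.1]))
        PySem.Dict.empty).items
      = (PySem.Set.ofList L).map (fun name => (name, posIdx L name)) := by
  rw [PySem.Dict.items_eq_map_keys _ (by
      rw [keys_groupFold]; exact PySem.Set.nodup_ofList L) ([] : List Int)]
  rw [keys_groupFold]
  exact List.map_congr_left (fun name _ => by rw [getD_groupFold])

lemma foldl_pySetD (v : Nat → String) :
    ∀ (ws : List (Int × String)) (out : List String),
    (∀ w ∈ ws, ∃ jw : Nat, w.1 = (jw : Int) ∧ jw < out.length ∧ w.2 = v jw) →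
    (ws.foldl (fun o w => PySem.List.pySetD o w.1 w.2) out).length = out.length ∧
    ∀ j : Nat, j < out.length →
      (ws.foldl (fun o w => PySem.List.pySetD o w.1 w.2) out)[j]? =
        if (∃ w ∈ ws, w.1 = (j : Int)) then some (v j) else out[j]? := by
  intro ws
  induction ws with
  | nil => intro out _; simp
  | cons w rest ih =>
      intro out hws
      obtain ⟨jw, hw1, hwlt, hw2⟩ := hws w (List.mem_cons_self)
      have hset : PySem.List.pySetD out w.1 w.2 = out.set jw (v jw) := by
        rw [hw1, hw2, PySem.List.pySetD_natCast]
      have hlen' : (out.set jw (v jw)).length = out.length := by simp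
      have hrest : ∀ x ∈ rest, ∃ jx : Nat, x.1 = (jx : Int) ∧ jx < (out.set jw (v jw)).length ∧ x.2 = v jx := by
        intro x hx
        obtain ⟨jx, h1, h2, h3⟩ := hws x (List.mem_cons_of_mem _ hx)
        exact ⟨jx, h1, by omega, h3⟩
      obtain ⟨ihlen, ihget⟩ := ih (out.set jw (v jw)) hrest
      rw [List.foldl_cons, hset]
      refine ⟨by rw [ihlen, hlen'], ?_⟩
      intro j hj
      rw [ihget j (by omega)]
      by_cases hjr : ∃ x ∈ rest, x.1 = (j : Int)
      · obtain ⟨x, hx, hxj⟩ := hjr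
        rw [if_pos ⟨x, hx, hxj⟩, if_pos ⟨x, List.mem_cons_of_mem _ hx, hxj⟩]
      · rw [if_neg hjr]
        by_cases hjw : j = jw
        · subst hjw
          rw [if_pos ⟨w, List.mem_cons_self, hw1⟩]
          rw [List.getElem?_set_self (by omega)]
        · have : (∃ x ∈ w :: rest, x.1 = (j : Int)) ↔ False := by
            simp only [List.mem_cons, iff_false]
            rintro ⟨x, hx | hx, hxj⟩
            · subst hx; rw [hw1] at hxj; exact hjw (by exact_mod_cast hxj.symm)
            · exact hjr ⟨x, hx, hxj⟩
          rw [if_neg (this.mp), List.getElem?_set_ne (by omega)]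

def fillG (L : List String) (out : List String) (name : String) : List String :=
  if (posIdx L name).length == 1 then
    PySem.List.pySetD out (PySem.List.pyGetD (posIdx L name) 0 0) name
  else
    (PySem.List.enumerate (posIdx L name)).foldl
      (fun out q => PySem.List.pySetD out q.2 (name ++ "_" ++ PySem.Int.toStr (q.1 + 1))) out

lemma fillG_spec (L : List String) (name : String) (out : List String)
    (hlen : out.length = L.length) (hmem : name ∈ L) :
    (fillG L out name).length = L.length ∧
    ∀ j : Nat, j < L.length →
      (fillG L out name)[j]? = if L[j]? = some name then some (nthOut L j) else out[j]? := by
  unfold fillG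
  by_cases h1 : (posIdx L name).length = 1
  · rw [if_pos (by simpa using h1)]
    obtain ⟨j0, hj0, hg, hget, _⟩ := posIdx_elem L name 0 (by omega)
    have hpos : posIdx L name = [(j0 : Int)] := by
      cases hp : posIdx L name with
      | nil => rw [hp] at h1; simp at h1
      | cons a t =>
          rw [hp] at h1 hg
          simp at h1 hg
          simp [h1, hg]
    have hcnt1 : L.count name = 1 := by rw [← length_posIdx, h1]
    have hv : nthOut L j0 = name := by
      simp [nthOut, List.getD_eq_getElem?_getD, hget, hcnt1]
    rw [hpos]
    have hg0 : PySem.List.pyGetD [(j0 : Int)] 0 0 = (j0 : Int) := by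
      rw [PySem.List.pyGetD_zero]; rfl
    rw [hg0, PySem.List.pySetD_natCast]
    refine ⟨by simp [hlen], ?_⟩
    intro j hj
    by_cases hje : j = j0
    · subst hje
      rw [if_pos hget, List.getElem?_set_self (by omega), hv]
    · rw [List.getElem?_set_ne (fun h => hje h.symm)]
      rw [if_neg ?_]
      intro hLj
      have hjm : (j : Int) ∈ posIdx L name := by
        rw [mem_posIdx]
        exact ⟨hj, by simpa [hj] using hLj⟩
      rw [hpos] at hjm
      simp at hjm
      exact hje (by exact_mod_cast hjm)
  · rw [if_neg (by simpa using h1)]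
    have hcnt : 1 ≤ L.count name := List.one_le_count_iff.mpr hmem
    have h2 : 2 ≤ (posIdx L name).length := by
      rw [length_posIdx]; rw [length_posIdx] at h1; omega
    have hbig : 1 < L.count name := by rw [← length_posIdx]; omega
    have hfm : (((PySem.List.enumerate (posIdx L name)).map
          (fun q => (q.2, name ++ "_" ++ PySem.Int.toStr (q.1 + 1)))).foldl
          (fun o w => PySem.List.pySetD o w.1 w.2) out)
        = (PySem.List.enumerate (posIdx L name)).foldl
          (fun out q => PySem.List.pySetD out q.2 (name ++ "_" ++ PySem.Int.toStr (q.1 + 1))) out := by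
      rw [List.foldl_map]
    rw [← hfm]
    have hws : ∀ w ∈ ((PySem.List.enumerate (posIdx L name)).map
          (fun q => (q.2, name ++ "_" ++ PySem.Int.toStr (q.1 + 1)))),
        ∃ jw : Nat, w.1 = (jw : Int) ∧ jw < out.length ∧ w.2 = nthOut L jw := by
      intro w hw
      obtain ⟨q, hq, rfl⟩ := List.mem_map.mp hw
      obtain ⟨k, hk, rfl⟩ := (PySem.List.mem_enumerate_iff _ _ _).mp hq
      obtain ⟨j, hjlt, hjg, hjget, hjcnt⟩ := posIdx_elem L name k hk
      have hidx : (posIdx L name)[k] = (j : Int) := by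
        have h := hjg; rw [List.getElem?_eq_getElem hk] at h; exact Option.some.inj h
      refine ⟨j, by simpa using hidx, by omega, ?_⟩
      have hnm : L.getD j "" = name := by
        rw [List.getD_eq_getElem?_getD, hjget]; rfl
      simp only [nthOut, hnm, if_pos hbig, hjcnt]
      congr 2
      push_cast
      ring
    obtain ⟨hl, hg⟩ := foldl_pySetD (nthOut L) _ out hws
    refine ⟨by rw [hl, hlen], ?_⟩
    intro j hj
    rw [hg j (by omega)]
    have hcond : (∃ w ∈ ((PySem.List.enumerate (posIdx L name)).map
          (fun q => (q.2, name ++ "_" ++ PySem.Int.toStr (q.1 + 1)))), w.1 = (j : Int))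
        ↔ L[j]? = some name := by
      constructor
      · rintro ⟨w, hw, hwj⟩
        obtain ⟨q, hq, rfl⟩ := List.mem_map.mp hw
        obtain ⟨k, hk, rfl⟩ := (PySem.List.mem_enumerate_iff _ _ _).mp hq
        have : (j : Int) ∈ posIdx L name := by
          rw [← hwj]; exact List.getElem_mem hk
        obtain ⟨hjl, hje⟩ := (mem_posIdx L name j).mp this
        rw [List.getElem?_eq_getElem hjl, hje]
      · intro hLj
        have hjm : (j : Int) ∈ posIdx L name := by
          rw [mem_posIdx]
          exact ⟨hj, by simpa [hj] using hLj⟩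
        obtain ⟨k, hk, hke⟩ := List.mem_iff_getElem.mp hjm
        refine ⟨((0 + (k : Int), (posIdx L name)[k]).2,
            name ++ "_" ++ PySem.Int.toStr ((0 + (k : Int), (posIdx L name)[k]).1 + 1)), ?_, by simpa using hke⟩
        exact List.mem_map.mpr ⟨(0 + (k : Int), (posIdx L name)[k]),
          (PySem.List.mem_enumerate_iff _ _ _).mpr ⟨k, hk, rfl⟩, rfl⟩
    simp only [hcond]

lemma fillFold (L : List String) : ∀ (names out : List String),
    out.length = L.length → (∀ nm ∈ names, nm ∈ L) →
    (names.foldl (fillG L) out).length = L.length ∧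
    ∀ j : Nat, j < L.length →
      (names.foldl (fillG L) out)[j]? =
        if (∃ nm ∈ names, L[j]? = some nm) then some (nthOut L j) else out[j]? := by
  intro names
  induction names with
  | nil => intro out hlen _; simp [hlen]
  | cons nm rest ih =>
      intro out hlen hmem
      obtain ⟨hGlen, hGget⟩ := fillG_spec L nm out hlen (hmem nm List.mem_cons_self)
      obtain ⟨ihlen, ihget⟩ := ih (fillG L out nm) hGlen (fun x hx => hmem x (List.mem_cons_of_mem _ hx))
      rw [List.foldl_cons]
      refine ⟨ihlen, ?_⟩
      intro j hj
      rw [ihget j hj]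
      by_cases hr : ∃ x ∈ rest, L[j]? = some x
      · obtain ⟨x, hx, hjx⟩ := hr
        rw [if_pos ⟨x, hx, hjx⟩, if_pos ⟨x, List.mem_cons_of_mem _ hx, hjx⟩]
      · rw [if_neg hr, hGget j hj]
        by_cases hn : L[j]? = some nm
        · rw [if_pos hn, if_pos ⟨nm, List.mem_cons_self, hn⟩]
        · rw [if_neg hn, if_neg ?_]
          rintro ⟨x, hx, hjx⟩
          rcases List.mem_cons.mp hx with h | h
          · exact hn (h ▸ hjx)
          · exact hr ⟨x, h, hjx⟩

lemma B_eq_spec (L : List String) : numberMultiples_alt L = specOut L := by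
  show (List.foldl _ (List.replicate L.length "")
      ((List.foldl (fun d p => PySem.Dict.modify d p.2 [] fun l => l ++ [p.1]) PySem.Dict.empty (PySem.List.enumerate L)).items)) = specOut L
  rw [items_groupFold]
  have hfm : (((PySem.Set.ofList L).map (fun name => (name, posIdx L name))).foldl
        (fun out p =>
          if p.2.length == 1 then
            PySem.List.pySetD out (PySem.List.pyGetD p.2 0 0) p.1
          else
            (PySem.List.enumerate p.2).foldl
              (fun out q => PySem.List.pySetD out q.2 (p.1 ++ "_" ++ PySem.Int.toStr (q.1 + 1))) out)
        (List.replicate L.length ""))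
      = (PySem.Set.ofList L).foldl (fillG L) (List.replicate L.length "") := by
    rw [List.foldl_map]
    rfl
  rw [hfm]
  obtain ⟨hlen, hget⟩ := fillFold L (PySem.Set.ofList L) (List.replicate L.length "")
    (by simp) (fun nm h => (PySem.Set.mem_ofList L nm).mp h)
  apply List.ext_getElem?
  intro j
  by_cases hj : j < L.length
  · rw [hget j hj]
    rw [if_pos ⟨L[j], (PySem.Set.mem_ofList L L[j]).mpr (List.getElem_mem hj),
        (List.getElem?_eq_getElem hj)⟩]
    unfold specOut
    rw [List.getElem?_map, List.getElem?_range hj]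
    rfl
  · rw [List.getElem?_eq_none (by omega), List.getElem?_eq_none ?_]
    unfold specOut
    simp
    omega

lemma repFold_mem (L l rn0 : List String) (x : String) :
    x ∈ l.foldl (fun rn name =>
        if !(rn.contains name) then
          if PySem.List.count L name > 1 then rn ++ [name] else rn
        else rn) rn0
      ↔ x ∈ rn0 ∨ (x ∈ l ∧ PySem.List.count L x > 1) := by
  induction l generalizing rn0 with
  | nil => simp
  | cons h t ih =>
      rw [List.foldl_cons, ih, List.mem_cons]
      simp only [PySem.List.count_eq, gt_iff_lt]
      by_cases hx : x = h
      · subst hx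
        by_cases hc : x ∈ rn0 <;> by_cases hcnt : 1 < List.count x L <;>
          simp [hc, hcnt]
      · by_cases hc : h ∈ rn0 <;> by_cases hcnt : 1 < List.count h L <;>
          simp [hc, hcnt, hx]

lemma mem_repNames (listin : List String) (x : String) :
    x ∈ repNames listin ↔ x ∈ listin ∧ PySem.List.count listin x > 1 := by
  unfold repNames
  rw [repFold_mem]
  simp

lemma step_dict (d : PySem.Dict String Int) (name : String) :
    (if !(d.contains name) then d.insert name 1 else PySem.Dict.modify d name 0 (· + 1))
      = d.insert name (d.getD name 0 + 1) := by
  by_cases hc : d.contains name = true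
  · simp [hc, PySem.Dict.modify]
  · have hc' : d.contains name = false := by simpa using hc
    simp [hc', PySem.Dict.getD_of_not_contains d 0 hc']

lemma Aloop (L : List String) : ∀ (suf pref out0 : List String) (d : PySem.Dict String Int),
    L = pref ++ suf →
    (∀ x, 1 < L.count x → d.getD x 0 = (pref.count x : Int)) →
    (suf.foldl (stepA (repNames L)) (out0, d)).1
      = out0 ++ (List.range suf.length).map (fun k => nthOut L (pref.length + k)) := by
  intro suf
  induction suf with
  | nil => intro pref out0 d _ _; simp
  | cons name rest ih =>
      intro pref out0 d hL hinv
      have hLsplit : L = (pref ++ [name]) ++ rest := by rw [hL]; simp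
      have hgetp : L[pref.length]? = some name := by
        rw [hL, List.getElem?_append_right (le_refl _)]
        simp
      have hnmD : L.getD pref.length "" = name := by
        rw [List.getD_eq_getElem?_getD, hgetp]; rfl
      have htake : L.take (pref.length + 1) = pref ++ [name] := by
        rw [hL, List.take_append]
        simp
      have hrange : (List.range (rest.length + 1)).map (fun k => nthOut L (pref.length + k))
          = nthOut L pref.length ::
            (List.range rest.length).map (fun k => nthOut L ((pref ++ [name]).length + k)) := by
        rw [List.range_succ_eq_map, List.map_cons, List.map_map]
        refine congrArg₂ _ (by simp) (List.map_congr_left (fun k _ => ?_))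
        simp only [Function.comp_apply, List.length_append, List.length_singleton]
        congr 1
        omega
      rw [List.foldl_cons, List.length_cons, hrange]
      by_cases hrep : (repNames L).contains name = true
      · have hb : 1 < L.count name := by
          have := (mem_repNames L name).mp (by simpa using hrep)
          simpa [PySem.List.count_eq] using this.2
        have hnth : nthOut L pref.length
            = name ++ "_" ++ PySem.Int.toStr ((pref.count name : Int) + 1) := by
          simp only [nthOut, hnmD, if_pos hb, htake]
          congr 2
          rw [count_append_singleton]
          push_cast
          simp
        have hstep : stepA (repNames L) (out0, d) name
            = (out0 ++ [nthOut L pref.length], d.insert name (d.getD name 0 + 1)) := by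
          unfold stepA
          rw [if_pos hrep]
          simp only [step_dict]
          rw [PySem.Dict.getD_insert_self, hinv name hb, hnth]
        rw [hstep, ih (pref ++ [name]) _ _ hLsplit ?_]
        · simp
        · intro x hx
          rw [PySem.Dict.getD_insert, count_append_singleton]
          by_cases hxe : x = name
          · subst hxe
            rw [if_pos rfl, hinv x hx]
            push_cast
            simp
          · rw [if_neg hxe, hinv x hx]
            simp [(show ¬ name = x from fun h => hxe h.symm)]
      · have hnb : ¬ 1 < L.count name := by
          intro hgt
          exact hrep (List.contains_iff_mem.mpr ((mem_repNames L name).mpr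
            ⟨by rw [hL]; simp, by simpa [PySem.List.count_eq] using hgt⟩))
        have hnth : nthOut L pref.length = name := by
          simp only [nthOut, hnmD, if_neg hnb]
        have hstep : stepA (repNames L) (out0, d) name = (out0 ++ [nthOut L pref.length], d) := by
          unfold stepA
          rw [if_neg hrep, hnth]
        rw [hstep, ih (pref ++ [name]) _ _ hLsplit ?_]
        · simp
        · intro x hx
          rw [count_append_singleton, hinv x hx]
          have hxe : ¬ x = name := fun h => hnb (h ▸ hx)
          simp [(show ¬ name = x from fun h => hxe h.symm)]

lemma A_eq_spec (L : List String) : numberMultiples L = specOut L := by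
  unfold numberMultiples
  rw [Aloop L L [] [] PySem.Dict.empty (by simp) (by intro x _; simp)]
  simp [specOut]

-- ===== VERDICT (by name: the statement is the Claim_ definition above) =====
theorem numberMultiples_spec : Claim_equal_numberMultiples := by
  intro listin _
  unfold Spec_numberMultiples
  rw [A_eq_spec, B_eq_spec]
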